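-- pv_equiv track=rewrite | github.com/patrickmesana/nlpkit | nlpkit/utils.py | iterate_list_with_window
-- ===== SOURCE A (Python) =====
-- def iterate_list_with_window(a_list, gram_as_list):
--     window_size = len(gram_as_list)
--     i = 0
--     while i < len(a_list):
--         if a_list[i:i + window_size] == gram_as_list:
--             yield gram_as_list, list(range(i, i + window_size)), True
--             i += window_size
--         else:
--             yield [a_list[i]], [i], False
--             i += 1
-- ===== SOURCE B (Python) =====
-- def iterate_list_with_window(a_list, gram_as_list):
--     # Two-phase: first collect the greedy non-overlapping match starts in one pass,
--     # then emit the output in a second pass with a skip counter (no while/index loop).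
--     m = len(gram_as_list)
--     n = len(a_list)
--     starts = []
--     nxt = 0
--     for i in range(n):
--         if i >= nxt and a_list[i:i + m] == gram_as_list:
--             starts.append(i)
--             nxt = i + m
--     starts_set = set(starts)
--     skip = 0
--     for i in range(n):
--         if skip:
--             skip -= 1
--             continue
--         if i in starts_set:
--             yield gram_as_list, list(range(i, i + m)), True
--             skip = m - 1
--         else:
--             yield [a_list[i]], [i], False
-- ===== Notes on version B (the rewrite author's own statement) =====
-- stated objective: alternative
-- what changed: Replaces A's single index-advancing while-loop by two passes: first collect the greedy non-overlapping match start positions into a set, then emit the output in one for-loop with a skip counter.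
-- outside the precondition, e.g. on iterate_list_with_window([1], []): A does not finish within the time limit, B returns [([], [], True)]
import Mathlib
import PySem

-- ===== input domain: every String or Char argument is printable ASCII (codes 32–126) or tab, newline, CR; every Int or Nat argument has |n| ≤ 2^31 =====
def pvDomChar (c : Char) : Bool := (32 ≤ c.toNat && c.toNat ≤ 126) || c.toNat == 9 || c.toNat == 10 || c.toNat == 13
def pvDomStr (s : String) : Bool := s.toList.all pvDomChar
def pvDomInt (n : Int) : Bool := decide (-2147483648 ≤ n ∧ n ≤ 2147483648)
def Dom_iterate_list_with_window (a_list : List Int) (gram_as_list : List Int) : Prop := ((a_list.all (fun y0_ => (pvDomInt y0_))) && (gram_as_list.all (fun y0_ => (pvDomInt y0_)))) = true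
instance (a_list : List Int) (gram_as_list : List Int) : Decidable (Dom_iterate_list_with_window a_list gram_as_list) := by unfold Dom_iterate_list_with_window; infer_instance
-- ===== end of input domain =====

-- B replaces A's single while-loop scan by two passes: collect the greedy non-overlapping
-- match starts first, then emit the output with a skip counter (objective: alternative).

-- ===== PORT A =====
-- A's while-loop, ported with a fuel counter (one unit per iteration; a_list.length units
-- suffice whenever the Python loop terminates, i.e. whenever i strictly increases).
def pvGoA (a g : List Int) : Nat → Nat → List (List Int × List Int × Bool)
  | 0, _ => []
  | fuel + 1, i =>
    if i < a.length then
      if PySem.List.slice a (some (i : Int)) (some ((i : Int) + (g.length : Int))) = g then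
        (g, PySem.List.pyRange (i : Int) ((i : Int) + (g.length : Int)) 1, true) ::
          pvGoA a g fuel (i + g.length)
      else
        -- a_list[i] with 0 ≤ i < len: pyGetD is exact here
        ([PySem.List.pyGetD a (i : Int) 0], [(i : Int)], false) :: pvGoA a g fuel (i + 1)
    else []

def iterate_list_with_window (a_list : List Int) (gram_as_list : List Int) : List (List Int × List Int × Bool) :=
  pvGoA a_list gram_as_list a_list.length 0

-- ===== PORT B =====
-- phase 1 of Source B: fold collecting greedy non-overlapping match starts (state: starts, nxt)
def pvStep1 (a g : List Int) (st : List Nat × Nat) (i : Nat) : List Nat × Nat :=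
  if st.2 ≤ i ∧ PySem.List.slice a (some (i : Int)) (some ((i : Int) + (g.length : Int))) = g then
    (st.1 ++ [i], i + g.length)
  else st

-- phase 2 of Source B: fold emitting output with a skip counter (state: out, skip)
def pvStep2 (a g : List Int) (M : PySem.Set Nat)
    (st : List (List Int × List Int × Bool) × Int) (i : Nat) :
    List (List Int × List Int × Bool) × Int :=
  if st.2 ≠ 0 then (st.1, st.2 - 1)
  else if i ∈ M then
    (st.1 ++ [(g, PySem.List.pyRange (i : Int) ((i : Int) + (g.length : Int)) 1, true)],
      (g.length : Int) - 1)
  else (st.1 ++ [([PySem.List.pyGetD a (i : Int) 0], [(i : Int)], false)], 0)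

def iterate_list_with_window_alt (a_list : List Int) (gram_as_list : List Int) : List (List Int × List Int × Bool) :=
  ((List.range a_list.length).foldl
      (pvStep2 a_list gram_as_list
        (PySem.Set.ofList ((List.range a_list.length).foldl (pvStep1 a_list gram_as_list) ([], 0)).1))
      ([], 0)).1

-- ===== PRECONDITION & SPEC =====
-- Pre_ excludes only an empty gram_as_list with a nonempty a_list: there A's loop never
-- advances (window size 0 always matches) and the generator yields forever (divergence).
def Pre_iterate_list_with_window (a_list : List Int) (gram_as_list : List Int) : Prop :=
  gram_as_list ≠ [] ∨ a_list = []
instance (a_list : List Int) (gram_as_list : List Int) : Decidable (Pre_iterate_list_with_window a_list gram_as_list) := by unfold Pre_iterate_list_with_window; infer_instance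

def pvWitness_iterate_list_with_window : List Int × List Int := ([1, 2, 1, 2, 3], [2, 3])

def Spec_iterate_list_with_window (a_list : List Int) (gram_as_list : List Int) (out : List (List Int × List Int × Bool)) : Prop := out = iterate_list_with_window_alt a_list gram_as_list
instance (a_list : List Int) (gram_as_list : List Int) (out : List (List Int × List Int × Bool)) : Decidable (Spec_iterate_list_with_window a_list gram_as_list out) := by unfold Spec_iterate_list_with_window; infer_instance

-- ===== CLAIM (what is proved, stated in full; the proofs are below) =====
def Claim_equal_iterate_list_with_window : Prop := ∀ (a_list : List Int) (gram_as_list : List Int), Dom_iterate_list_with_window a_list gram_as_list → Pre_iterate_list_with_window a_list gram_as_list → Spec_iterate_list_with_window a_list gram_as_list (iterate_list_with_window a_list gram_as_list)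

-- ===== LEMMAS AND PROOFS =====

-- reference function: the per-position recursion both ports compute (g nonempty)
def pvR (a g : List Int) (h : g ≠ []) (i : Nat) : List (List Int × List Int × Bool) :=
  if _hi : i < a.length then
    if PySem.List.slice a (some (i : Int)) (some ((i : Int) + (g.length : Int))) = g then
      (g, PySem.List.pyRange (i : Int) ((i : Int) + (g.length : Int)) 1, true) ::
        pvR a g h (i + g.length)
    else
      ([PySem.List.pyGetD a (i : Int) 0], [(i : Int)], false) :: pvR a g h (i + 1)
  else []
termination_by a.length - i
decreasing_by
  all_goals
    have hg : 0 < g.length := List.length_pos_iff.mpr h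
    omega

-- greedy non-overlapping match starts from position i (g nonempty)
def pvS (a g : List Int) (h : g ≠ []) (i : Nat) : List Nat :=
  if _hi : i < a.length then
    if PySem.List.slice a (some (i : Int)) (some ((i : Int) + (g.length : Int))) = g then
      i :: pvS a g h (i + g.length)
    else pvS a g h (i + 1)
  else []
termination_by a.length - i
decreasing_by
  all_goals
    have hg : 0 < g.length := List.length_pos_iff.mpr h
    omega

-- unfolding equations for pvS / pvR
lemma pvS_nil (a g : List Int) (h : g ≠ []) (i : Nat) (hi : ¬ i < a.length) :
    pvS a g h i = [] := by
  conv_lhs => rw [pvS]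
  rw [dif_neg hi]

lemma pvS_match (a g : List Int) (h : g ≠ []) (i : Nat) (hi : i < a.length)
    (hc : PySem.List.slice a (some (i : Int)) (some ((i : Int) + (g.length : Int))) = g) :
    pvS a g h i = i :: pvS a g h (i + g.length) := by
  conv_lhs => rw [pvS]
  rw [dif_pos hi, if_pos hc]

lemma pvS_nomatch (a g : List Int) (h : g ≠ []) (i : Nat) (hi : i < a.length)
    (hc : ¬ PySem.List.slice a (some (i : Int)) (some ((i : Int) + (g.length : Int))) = g) :
    pvS a g h i = pvS a g h (i + 1) := by
  conv_lhs => rw [pvS]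
  rw [dif_pos hi, if_neg hc]

lemma pvR_nil (a g : List Int) (h : g ≠ []) (i : Nat) (hi : ¬ i < a.length) :
    pvR a g h i = [] := by
  conv_lhs => rw [pvR]
  rw [dif_neg hi]

lemma pvR_match (a g : List Int) (h : g ≠ []) (i : Nat) (hi : i < a.length)
    (hc : PySem.List.slice a (some (i : Int)) (some ((i : Int) + (g.length : Int))) = g) :
    pvR a g h i
      = (g, PySem.List.pyRange (i : Int) ((i : Int) + (g.length : Int)) 1, true)
          :: pvR a g h (i + g.length) := by
  conv_lhs => rw [pvR]
  rw [dif_pos hi, if_pos hc]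

lemma pvR_nomatch (a g : List Int) (h : g ≠ []) (i : Nat) (hi : i < a.length)
    (hc : ¬ PySem.List.slice a (some (i : Int)) (some ((i : Int) + (g.length : Int))) = g) :
    pvR a g h i
      = ([PySem.List.pyGetD a (i : Int) 0], [(i : Int)], false) :: pvR a g h (i + 1) := by
  conv_lhs => rw [pvR]
  rw [dif_pos hi, if_neg hc]

lemma pvS_lb (a g : List Int) (h : g ≠ []) :
    ∀ i j, j ∈ pvS a g h i → i ≤ j := by
  have hg : 0 < g.length := List.length_pos_iff.mpr h
  intro i
  induction i using pvS.induct a g h with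
  | case1 i hi hc ih =>
    intro j hj
    rw [pvS_match a g h i hi hc, List.mem_cons] at hj
    rcases hj with rfl | hj
    · exact le_refl _
    · have := ih j hj; omega
  | case2 i hi hc ih =>
    intro j hj
    rw [pvS_nomatch a g h i hi hc] at hj
    have := ih j hj; omega
  | case3 i hi =>
    intro j hj
    rw [pvS_nil a g h i hi] at hj
    exact absurd hj (List.not_mem_nil)

-- a successful slice comparison means the window fits: i + |g| ≤ |a|
lemma pvSlice_fits (a g : List Int) (i : Nat) (hi : i < a.length)
    (hc : PySem.List.slice a (some (i : Int)) (some ((i : Int) + (g.length : Int))) = g) :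
    i + g.length ≤ a.length := by
  have hl := congrArg List.length hc
  rw [show ((i : Int) + (g.length : Int)) = (((i + g.length : Nat) : Int)) by push_cast; ring] at hl
  rw [PySem.List.slice_natCast] at hl
  simp [List.length_take, List.length_drop] at hl
  omega

lemma pvS_self (a g : List Int) (h : g ≠ []) (i : Nat) (hi : i < a.length) :
    (i ∈ pvS a g h i) ↔
      PySem.List.slice a (some (i : Int)) (some ((i : Int) + (g.length : Int))) = g := by
  have hg : 0 < g.length := List.length_pos_iff.mpr h
  constructor
  · intro hm
    by_contra hc
    rw [pvS_nomatch a g h i hi hc] at hm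
    have := pvS_lb a g h (i + 1) i hm
    omega
  · intro hc
    rw [pvS_match a g h i hi hc]
    exact List.mem_cons_self
-- A's fueled loop equals the reference once the fuel covers the remaining positions
lemma pvGoA_eq_R (a g : List Int) (h : g ≠ []) :
    ∀ fuel i, a.length ≤ i + fuel → pvGoA a g fuel i = pvR a g h i := by
  have hg : 0 < g.length := List.length_pos_iff.mpr h
  intro fuel
  induction fuel with
  | zero =>
    intro i hfi
    rw [pvGoA, pvR_nil a g h i (by omega)]
  | succ fuel ih =>
    intro i hfi
    rw [pvGoA]
    by_cases hi : i < a.length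
    · rw [if_pos hi]
      by_cases hc : PySem.List.slice a (some (i : Int)) (some ((i : Int) + (g.length : Int))) = g
      · rw [if_pos hc, pvR_match a g h i hi hc, ih (i + g.length) (by omega)]
      · rw [if_neg hc, pvR_nomatch a g h i hi hc, ih (i + 1) (by omega)]
    · rw [if_neg hi, pvR_nil a g h i hi]

-- phase 1 invariant: the fold over the remaining range appends exactly the greedy starts
lemma pvPhase1_inv (a g : List Int) (h : g ≠ []) :
    ∀ d i st nxt, a.length - i ≤ d →
      ((List.range' i (a.length - i)).foldl (pvStep1 a g) (st, nxt)).1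
        = st ++ pvS a g h (max i nxt) := by
  have hg : 0 < g.length := List.length_pos_iff.mpr h
  intro d
  induction d with
  | zero =>
    intro i st nxt hd
    have h0 : a.length - i = 0 := by omega
    rw [h0, pvS_nil a g h (max i nxt) (by omega)]
    simp
  | succ d ih =>
    intro i st nxt hd
    by_cases hi : i < a.length
    · have hsz : a.length - i = (a.length - (i + 1)) + 1 := by omega
      rw [hsz, List.range'_succ, List.foldl_cons]
      by_cases hni : nxt ≤ i
      · have hmax : max i nxt = i := Nat.max_eq_left hni
        by_cases hc : PySem.List.slice a (some (i : Int)) (some ((i : Int) + (g.length : Int))) = g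
        · have hstep : pvStep1 a g (st, nxt) i = (st ++ [i], i + g.length) := by
            simp [pvStep1, hni, hc]
          rw [hstep, ih (i + 1) (st ++ [i]) (i + g.length) (by omega)]
          have hmax2 : max (i + 1) (i + g.length) = i + g.length := by omega
          rw [hmax2, hmax, pvS_match a g h i hi hc]
          simp
        · have hstep : pvStep1 a g (st, nxt) i = (st, nxt) := by
            simp [pvStep1, hc]
          rw [hstep, ih (i + 1) st nxt (by omega)]
          have hmax2 : max (i + 1) nxt = i + 1 := by omega
          rw [hmax2, hmax, pvS_nomatch a g h i hi hc]
      · have hstep : pvStep1 a g (st, nxt) i = (st, nxt) := by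
          simp [pvStep1]
          intro hle
          omega
        rw [hstep, ih (i + 1) st nxt (by omega)]
        have hmax2 : max (i + 1) nxt = nxt := by omega
        have hmax3 : max i nxt = nxt := by omega
        rw [hmax2, hmax3]
    · have h0 : a.length - i = 0 := by omega
      rw [h0, pvS_nil a g h (max i nxt) (by omega)]
      simp

-- a positive skip counter blindly consumes the next k positions
lemma pvSkip_fold (a g : List Int) (M : PySem.Set Nat) :
    ∀ k i l st, k ≤ l →
      ((List.range' i l).foldl (pvStep2 a g M) (st, (k : Int))).1
        = ((List.range' (i + k) (l - k)).foldl (pvStep2 a g M) (st, 0)).1 := by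
  intro k
  induction k with
  | zero => intro i l st _; simp
  | succ k ih =>
    intro i l st hkl
    obtain ⟨l', rfl⟩ : ∃ l', l = l' + 1 := ⟨l - 1, by omega⟩
    rw [List.range'_succ, List.foldl_cons]
    have hstep : pvStep2 a g M (st, ((k + 1 : Nat) : Int)) i = (st, (k : Int)) := by
      unfold pvStep2
      rw [if_pos (show ((k + 1 : Nat) : Int) ≠ 0 by push_cast; omega)]
      congr 1
      push_cast
      ring
    rw [hstep, ih (i + 1) l' st (by omega)]
    have h1 : i + 1 + k = i + (k + 1) := by omega
    have h2 : l' - k = l' + 1 - (k + 1) := by omega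
    rw [h1, h2]

-- phase 2 invariant: with skip 0 and a start set that agrees with pvS from i on,
-- the fold emits exactly the reference output from i
lemma pvFold2_inv (a g : List Int) (h : g ≠ []) (M : PySem.Set Nat) :
    ∀ d i st, a.length - i ≤ d →
      (∀ j, i ≤ j → ((j ∈ M) ↔ j ∈ pvS a g h i)) →
      ((List.range' i (a.length - i)).foldl (pvStep2 a g M) (st, 0)).1
        = st ++ pvR a g h i := by
  have hg : 0 < g.length := List.length_pos_iff.mpr h
  intro d
  induction d with
  | zero =>
    intro i st hd _
    have h0 : a.length - i = 0 := by omega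
    rw [h0, pvR_nil a g h i (by omega)]
    simp
  | succ d ih =>
    intro i st hd hM
    by_cases hi : i < a.length
    · have hsz : a.length - i = (a.length - (i + 1)) + 1 := by omega
      rw [hsz, List.range'_succ, List.foldl_cons]
      by_cases hc : PySem.List.slice a (some (i : Int)) (some ((i : Int) + (g.length : Int))) = g
      · have hiM : i ∈ M := (hM i (le_refl i)).mpr ((pvS_self a g h i hi).mpr hc)
        have hstep : pvStep2 a g M (st, 0) i
            = (st ++ [(g, PySem.List.pyRange (i : Int) ((i : Int) + (g.length : Int)) 1, true)],
               (g.length : Int) - 1) := by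
          simp [pvStep2, hiM]
        rw [hstep]
        have hfits : i + g.length ≤ a.length := pvSlice_fits a g i hi hc
        have hcast : ((g.length : Int) - 1) = ((g.length - 1 : Nat) : Int) := by
          push_cast [Nat.cast_sub hg]
          ring
        rw [hcast, pvSkip_fold a g M (g.length - 1) (i + 1) (a.length - (i + 1)) _ (by omega)]
        have h1 : i + 1 + (g.length - 1) = i + g.length := by omega
        have h2 : a.length - (i + 1) - (g.length - 1) = a.length - (i + g.length) := by omega
        rw [h1, h2]
        have hM' : ∀ j, i + g.length ≤ j → ((j ∈ M) ↔ j ∈ pvS a g h (i + g.length)) := by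
          intro j hj
          rw [hM j (by omega), pvS_match a g h i hi hc, List.mem_cons]
          constructor
          · rintro (rfl | hmem)
            · omega
            · exact hmem
          · intro hmem; exact Or.inr hmem
        rw [ih (i + g.length) _ (by omega) hM', pvR_match a g h i hi hc]
        simp
      · have hiM : i ∉ M := by
          intro hmem
          exact hc ((pvS_self a g h i hi).mp ((hM i (le_refl i)).mp hmem))
        have hstep : pvStep2 a g M (st, 0) i
            = (st ++ [([PySem.List.pyGetD a (i : Int) 0], [(i : Int)], false)], 0) := by
          simp [pvStep2, hiM]
        rw [hstep]
        have hM' : ∀ j, i + 1 ≤ j → ((j ∈ M) ↔ j ∈ pvS a g h (i + 1)) := by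
          intro j hj
          rw [hM j (by omega), pvS_nomatch a g h i hi hc]
        rw [ih (i + 1) _ (by omega) hM', pvR_nomatch a g h i hi hc]
        simp
    · have h0 : a.length - i = 0 := by omega
      rw [h0, pvR_nil a g h i hi]
      simp

-- ===== VERDICT (by name: the statement is the Claim_ definition above) =====
theorem iterate_list_with_window_spec : Claim_equal_iterate_list_with_window := by
  intro a g _hdom hpre
  unfold Spec_iterate_list_with_window
  rcases hpre with h | rfl
  · -- g nonempty: both sides equal the reference pvR from position 0
    have hA : iterate_list_with_window a g = pvR a g h 0 := by
      unfold iterate_list_with_window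
      exact pvGoA_eq_R a g h a.length 0 (by omega)
    have hstarts : ((List.range a.length).foldl (pvStep1 a g) ([], 0)).1 = pvS a g h 0 := by
      rw [List.range_eq_range']
      have := pvPhase1_inv a g h a.length 0 [] 0 (by omega)
      simpa using this
    have hB : iterate_list_with_window_alt a g = pvR a g h 0 := by
      unfold iterate_list_with_window_alt
      rw [hstarts, List.range_eq_range']
      have hM : ∀ j, 0 ≤ j → ((j ∈ PySem.Set.ofList (pvS a g h 0)) ↔ j ∈ pvS a g h 0) := by
        intro j _
        simp [PySem.Set.mem_ofList]
      have := pvFold2_inv a g h (PySem.Set.ofList (pvS a g h 0)) a.length 0 [] (by omega) hM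
      simpa using this
    rw [hA, hB]
  · -- a_list = []
    rfl
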